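-- pv_equiv track=rewrite | github.com/infinitetrooper/SiegFPL | src/player_positioning.py | calculate_total_widths
-- ===== SOURCE A (Python) =====
-- def calculate_total_widths(best_11):
--     total_widths = {}
--     for position in ['GK', 'DEF', 'MID', 'FWD']:
--         num_players = len([p for p in best_11 if p['position'] == position])
--         if num_players <= 1:
--             total_widths[position] = 0
--         elif num_players <= 2:
--             total_widths[position] = num_players * 30
--         elif num_players <= 3:
--             total_widths[position] = num_players * 20
--         else:
--             total_widths[position] = num_players * 15
--     return total_widths
-- ===== SOURCE B (Python) =====
-- def _width(n):
--     if n <= 1: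
--         return 0
--     if n <= 2:
--         return n * 30
--     if n <= 3:
--         return n * 20
--     return n * 15
--
--
-- def calculate_total_widths(best_11):
--     counts = dict.fromkeys(['GK', 'DEF', 'MID', 'FWD'], 0)
--     total_widths = dict.fromkeys(['GK', 'DEF', 'MID', 'FWD'], 0)
--     for p in best_11:
--         pos = p['position']
--         if pos in counts:
--             counts[pos] += 1
--             total_widths[pos] = _width(counts[pos])
--     return total_widths
-- ===== Notes on version B (the rewrite author's own statement) =====
-- stated objective: alternative
-- what changed: B makes a single pass over the players, incrementally maintaining per-position counts and recomputing that position's width online at each increment into a pre-seeded dict, instead of A's loop over the four positions each doing a filtered scan of the whole squad.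
import Mathlib
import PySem

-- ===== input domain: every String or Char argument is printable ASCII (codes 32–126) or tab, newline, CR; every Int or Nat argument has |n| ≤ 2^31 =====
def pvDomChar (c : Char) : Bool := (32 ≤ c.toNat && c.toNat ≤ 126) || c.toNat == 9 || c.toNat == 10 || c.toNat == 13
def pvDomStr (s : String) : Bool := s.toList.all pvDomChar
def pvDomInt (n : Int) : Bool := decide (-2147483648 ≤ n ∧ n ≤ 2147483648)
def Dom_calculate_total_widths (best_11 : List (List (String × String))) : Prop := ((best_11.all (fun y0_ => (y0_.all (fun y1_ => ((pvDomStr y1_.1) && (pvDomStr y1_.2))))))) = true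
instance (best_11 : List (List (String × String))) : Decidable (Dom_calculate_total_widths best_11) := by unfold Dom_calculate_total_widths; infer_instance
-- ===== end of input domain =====

-- B is a single pass over the players maintaining counts and widths online (alternative decomposition);
-- A loops over the four positions, each with a filtered scan of the squad.

-- ===== PORT A =====
-- p['position'] is ported as Dict.getD with default ""; under Pre_ every player has the key,
-- exactly where Python returns (elsewhere Python raises KeyError).
def calculate_total_widths (best_11 : List (List (String × String))) : List (String × Int) :=
  (["GK", "DEF", "MID", "FWD"].foldl (fun (tw : PySem.Dict String Int) position =>
      let num_players : Int :=
        ((best_11.filter (fun p => PySem.Dict.getD ⟨p⟩ "position" "" == position)).length : Int)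
      if num_players ≤ 1 then tw.insert position 0
      else if num_players ≤ 2 then tw.insert position (num_players * 30)
      else if num_players ≤ 3 then tw.insert position (num_players * 20)
      else tw.insert position (num_players * 15)) PySem.Dict.empty).items

-- ===== PORT B =====
def width_alt (n : Int) : Int :=
  if n ≤ 1 then 0 else if n ≤ 2 then n * 30 else if n ≤ 3 then n * 20 else n * 15

def calculate_total_widths_alt (best_11 : List (List (String × String))) : List (String × Int) :=
  let init : PySem.Dict String Int :=
    PySem.Dict.ofList [("GK", 0), ("DEF", 0), ("MID", 0), ("FWD", 0)]
  let st := best_11.foldl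
    (fun (s : PySem.Dict String Int × PySem.Dict String Int) p =>
      let pos := PySem.Dict.getD ⟨p⟩ "position" ""
      if s.1.contains pos then
        let c := s.1.insert pos (s.1.getD pos 0 + 1)
        (c, s.2.insert pos (width_alt (c.getD pos 0)))
      else s)
    (init, init)
  st.2.items

-- ===== PRECONDITION & SPEC =====
-- Pre_ excludes players without a 'position' key, on which A raises KeyError.
def Pre_calculate_total_widths (best_11 : List (List (String × String))) : Prop :=
  ∀ p ∈ best_11, (p.any (fun kv => kv.1 == "position")) = true
instance (best_11 : List (List (String × String))) : Decidable (Pre_calculate_total_widths best_11) := by unfold Pre_calculate_total_widths; infer_instance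
def pvWitness_calculate_total_widths : (List (List (String × String))) :=
  [[("position", "GK")], [("position", "DEF"), ("name", "x")]]
def Spec_calculate_total_widths (best_11 : List (List (String × String))) (out : List (String × Int)) : Prop := out = calculate_total_widths_alt best_11
instance (best_11 : List (List (String × String))) (out : List (String × Int)) : Decidable (Spec_calculate_total_widths best_11 out) := by unfold Spec_calculate_total_widths; infer_instance

-- ===== CLAIM =====
def Claim_equal_calculate_total_widths : Prop := ∀ (best_11 : List (List (String × String))), Dom_calculate_total_widths best_11 → Pre_calculate_total_widths best_11 → Spec_calculate_total_widths best_11 (calculate_total_widths best_11)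

-- ===== LEMMAS AND PROOFS =====

-- the position a player record yields in both ports
def posOf (p : List (String × String)) : String := PySem.Dict.getD ⟨p⟩ "position" ""

-- one step of B's fold
def stepB (s : PySem.Dict String Int × PySem.Dict String Int) (p : List (String × String)) :
    PySem.Dict String Int × PySem.Dict String Int :=
  let pos := posOf p
  if s.1.contains pos then
    let c := s.1.insert pos (s.1.getD pos 0 + 1)
    (c, s.2.insert pos (width_alt (c.getD pos 0)))
  else s

-- A's branch-per-insert equals one insert of width_alt of the count
lemma insert_if (tw : PySem.Dict String Int) (pos : String) (n : Int) :
    (if n ≤ 1 then tw.insert pos 0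
     else if n ≤ 2 then tw.insert pos (n * 30)
     else if n ≤ 3 then tw.insert pos (n * 20)
     else tw.insert pos (n * 15))
    = tw.insert pos (width_alt n) := by
  unfold width_alt; split_ifs <;> rfl

-- invariant of B's fold: keys never change, counts accumulate, widths track counts
lemma foldB_inv (l : List (List (String × String)))
    (c t : PySem.Dict String Int)
    (hct : ∀ k, t.contains k = c.contains k)
    (hw : ∀ k, c.contains k = true → t.getD k 0 = width_alt (c.getD k 0)) :
    (∀ k, (l.foldl stepB (c, t)).1.contains k = c.contains k) ∧
    (l.foldl stepB (c, t)).2.keys = t.keys ∧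
    (∀ k, c.contains k = true →
      (l.foldl stepB (c, t)).1.getD k 0 = c.getD k 0 + ((l.map posOf).count k : Int)) ∧
    (∀ k, c.contains k = true →
      (l.foldl stepB (c, t)).2.getD k 0 = width_alt ((l.foldl stepB (c, t)).1.getD k 0)) := by
  induction l generalizing c t with
  | nil =>
    refine ⟨fun k => rfl, rfl, fun k hk => by simp, fun k hk => hw k hk⟩
  | cons p rest ih =>
    simp only [List.foldl_cons]
    by_cases hpos : c.contains (posOf p) = true
    · have hstep : stepB (c, t) p =
        (c.insert (posOf p) (c.getD (posOf p) 0 + 1),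
         t.insert (posOf p) (width_alt ((c.insert (posOf p) (c.getD (posOf p) 0 + 1)).getD (posOf p) 0))) := by
        unfold stepB; simp [hpos]
      rw [hstep]
      set c' := c.insert (posOf p) (c.getD (posOf p) 0 + 1) with hc'
      set t' := t.insert (posOf p) (width_alt (c'.getD (posOf p) 0)) with ht'
      have hct' : ∀ k, t'.contains k = c'.contains k := by
        intro k
        simp [ht', hc', PySem.Dict.contains_insert, hct k]
      have hcc : ∀ k, c'.contains k = c.contains k := by
        intro k
        simp only [hc', PySem.Dict.contains_insert]
        by_cases h : (k == posOf p) = true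
        · have := eq_of_beq h; subst this; simp [hpos]
        · simp [h]
      have hw' : ∀ k, c'.contains k = true → t'.getD k 0 = width_alt (c'.getD k 0) := by
        intro k hk
        by_cases h : k = posOf p
        · subst h
          simp [ht', PySem.Dict.getD_insert_self]
        · rw [ht', PySem.Dict.getD_insert, if_neg h, hc', PySem.Dict.getD_insert, if_neg h]
          exact hw k (by rw [← hcc k]; exact hk)
      obtain ⟨i1, i2, i3, i4⟩ := ih c' t' hct' hw'
      refine ⟨fun k => (i1 k).trans (hcc k), ?_, ?_, ?_⟩
      · rw [i2, ht']
        exact PySem.Dict.keys_insert_of_contains _ _ (by rw [hct]; exact hpos)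
      · intro k hk
        rw [i3 k (by rw [hcc]; exact hk)]
        by_cases h : k = posOf p
        · subst h
          rw [hc', PySem.Dict.getD_insert_self]
          simp
          ring
        · rw [hc', PySem.Dict.getD_insert, if_neg h]
          have : posOf p ≠ k := fun e => h e.symm
          simp [this]
      · intro k hk
        exact i4 k (by rw [hcc]; exact hk)
    · have hstep : stepB (c, t) p = (c, t) := by
        unfold stepB; simp [hpos]
      rw [hstep]
      obtain ⟨i1, i2, i3, i4⟩ := ih c t hct hw
      refine ⟨i1, i2, ?_, i4⟩
      intro k hk
      rw [i3 k hk]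
      have : posOf p ≠ k := by
        intro e; rw [e] at hpos; exact hpos hk
      simp [this]

-- the count of a position among the players equals A's filtered length
lemma count_eq_filter (l : List (List (String × String))) (k : String) :
    ((l.map posOf).count k : Int)
      = ((l.filter (fun p => PySem.Dict.getD ⟨p⟩ "position" "" == k)).length : Int) := by
  congr 1
  rw [List.count_eq_countP, List.countP_map, List.countP_eq_length_filter]
  rfl

theorem calculate_total_widths_spec_aux (best_11 : List (List (String × String))) :
    calculate_total_widths best_11 = calculate_total_widths_alt best_11 := by
  -- A's side: four fresh inserts into an empty dict
  have hA : calculate_total_widths best_11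
      = ["GK", "DEF", "MID", "FWD"].map (fun pos =>
          (pos, width_alt (((best_11.filter
            (fun p => PySem.Dict.getD ⟨p⟩ "position" "" == pos)).length : Int)))) := by
    unfold calculate_total_widths
    simp only [insert_if]
    have := PySem.Dict.items_foldl_insert_fresh
      (l := ["GK", "DEF", "MID", "FWD"]) (k := fun pos => pos)
      (v := fun pos => width_alt (((best_11.filter
        (fun p => PySem.Dict.getD ⟨p⟩ "position" "" == pos)).length : Int)))
      (d := PySem.Dict.empty) (by decide) (by decide)
    simpa using this
  -- B's side: the fold's invariant
  have hB : calculate_total_widths_alt best_11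
      = ["GK", "DEF", "MID", "FWD"].map (fun pos =>
          (pos, width_alt ((best_11.map posOf).count pos : Int))) := by
    unfold calculate_total_widths_alt
    set init : PySem.Dict String Int :=
      PySem.Dict.ofList [("GK", 0), ("DEF", 0), ("MID", 0), ("FWD", 0)] with hinit
    have hfold : best_11.foldl
        (fun (s : PySem.Dict String Int × PySem.Dict String Int) p =>
          let pos := PySem.Dict.getD ⟨p⟩ "position" ""
          if s.1.contains pos then
            let c := s.1.insert pos (s.1.getD pos 0 + 1)
            (c, s.2.insert pos (width_alt (c.getD pos 0)))
          else s) (init, init) = best_11.foldl stepB (init, init) := rfl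
    simp only [hfold]
    obtain ⟨_, hkeys, hcnt, hwid⟩ := foldB_inv best_11 init init (fun k => rfl)
      (by intro k hk
          have hmem : k ∈ init.keys := by
            rw [← PySem.Dict.contains_iff_mem_keys]; exact hk
          have hkl : init.keys = ["GK", "DEF", "MID", "FWD"] := by rw [hinit]; rfl
          rw [hkl] at hmem
          have h0 : init.getD k 0 = 0 := by fin_cases hmem <;> decide
          rw [h0]; decide)
    have hnd : (best_11.foldl stepB (init, init)).2.keys.Nodup := by
      rw [hkeys, hinit]; decide
    rw [PySem.Dict.items_eq_map_keys _ hnd 0, hkeys]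
    have hkl : init.keys = ["GK", "DEF", "MID", "FWD"] := by rw [hinit]; rfl
    rw [hkl]
    apply List.map_congr_left
    intro k hkmem
    have hck : init.contains k = true := by
      rw [PySem.Dict.contains_iff_mem_keys, hkl]; exact hkmem
    have h0 : init.getD k 0 = 0 := by
      fin_cases hkmem <;> decide
    rw [hwid k hck, hcnt k hck, h0, zero_add]
  rw [hA, hB]
  apply List.map_congr_left
  intro k _
  rw [count_eq_filter]

-- ===== VERDICT =====
theorem calculate_total_widths_spec : Claim_equal_calculate_total_widths := by
  intro best_11 _ _
  exact calculate_total_widths_spec_aux best_11
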